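-- pv_equiv track=rewrite | github.com/Hyes-y/algorithm | backjoon/5525_IOIOI.py | solution
-- ===== SOURCE A (Python) =====
-- def solution(n, m, s):
--     idx = 0
--     p_cnt = 0
--     total = 0
--     while idx < m - 1:
--         if s[idx:idx+3] == "IOI":
--             p_cnt += 1
--             if p_cnt == n:
--                 total += 1
--                 p_cnt -= 1
--             idx += 2
--
--         else:
--             p_cnt = 0
--             idx += 1
--
--     return total
-- ===== SOURCE B (Python) =====
-- def solution(n, m, s):
--     # Run-decomposition: scan the readable region t = s[:m+1] for maximal
--     # alternating runs I(OI)+; a run containing k overlapping "IOI" triples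
--     # contributes max(0, k - n + 1) length-(2n+1) patterns.
--     if n < 1 or m < 2:
--         return 0
--     t = s[:m + 1]
--     L = len(t)
--     total = 0
--     i = 0
--     while i < L - 1:
--         if t[i] == 'I':
--             j = i
--             while j + 2 < L and t[j + 1] == 'O' and t[j + 2] == 'I':
--                 j += 2
--             k = (j - i) // 2
--             total += max(0, k - n + 1)
--             i = j + 1
--         else:
--             i += 1
--     return total
-- ===== Notes on version B (the rewrite author's own statement) =====
-- stated objective: alternative
-- what changed: Replaces A's sliding counter with reset-on-break over indices bounded by m with a run-decomposition scan of the readable region s[:m+1]: each maximal alternating run I(OI)+ with k overlapping IOI triples contributes max(0, k-n+1) patterns, summed in one pass over the string.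
import Mathlib
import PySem

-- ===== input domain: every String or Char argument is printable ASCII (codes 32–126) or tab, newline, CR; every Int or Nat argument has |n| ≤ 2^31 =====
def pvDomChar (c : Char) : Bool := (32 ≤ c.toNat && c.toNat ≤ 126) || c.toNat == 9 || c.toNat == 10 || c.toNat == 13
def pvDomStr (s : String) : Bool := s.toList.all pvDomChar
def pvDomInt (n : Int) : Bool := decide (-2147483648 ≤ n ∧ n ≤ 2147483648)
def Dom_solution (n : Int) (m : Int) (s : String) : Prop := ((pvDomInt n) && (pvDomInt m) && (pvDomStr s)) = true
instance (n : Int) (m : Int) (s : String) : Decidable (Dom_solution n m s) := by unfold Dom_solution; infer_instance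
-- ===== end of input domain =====

-- B re-implements A by run decomposition: it scans only the readable region s[:m+1] for
-- maximal alternating runs I(OI)+ and adds max(0, k-n+1) per run (k = IOI triples in the run),
-- instead of A's per-position sliding counter with reset; same return value everywhere (alternative decomposition).

-- ===== PORT A =====
def solLoop (n : Int) (m : Int) (cs : List Char) (idx : Int) (pcnt : Int) (total : Int) : Int :=
  if h : idx < m - 1 then
    if PySem.List.slice cs (some idx) (some (idx + 3)) = ['I', 'O', 'I'] then
      if pcnt + 1 = n then solLoop n m cs (idx + 2) (n - 1) (total + 1)
      else solLoop n m cs (idx + 2) (pcnt + 1) total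
    else solLoop n m cs (idx + 1) 0 total
  else total
termination_by (m - 1 - idx).toNat
decreasing_by all_goals omega

def solution (n : Int) (m : Int) (s : String) : Int :=
  solLoop n m s.toList 0 0 0

-- ===== PORT B =====
def altInner (t : List Char) (L : Int) (j : Int) : Int :=
  if h : j + 2 < L ∧ PySem.List.pyGet? t (j + 1) = some 'O' ∧ PySem.List.pyGet? t (j + 2) = some 'I'
  then altInner t L (j + 2) else j
termination_by (L - j).toNat
decreasing_by omega

theorem altInner_ge (t : List Char) (L : Int) (j : Int) : j ≤ altInner t L j := by
  rw [altInner]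
  split
  · have := altInner_ge t L (j + 2); omega
  · omega
termination_by (L - j).toNat
decreasing_by omega

def altOuter (n : Int) (t : List Char) (L : Int) (i : Int) (total : Int) : Int :=
  if h : i < L - 1 then
    if PySem.List.pyGet? t i = some 'I' then
      altOuter n t L (altInner t L i + 1)
        (total + max 0 (PySem.Int.floordiv (altInner t L i - i) 2 - n + 1))
    else altOuter n t L (i + 1) total
  else total
termination_by (L - i).toNat
decreasing_by
  · have := altInner_ge t L i; omega
  · omega

def solution_alt (n : Int) (m : Int) (s : String) : Int :=
  if n < 1 ∨ m < 2 then 0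
  else
    let t := PySem.List.slice s.toList none (some (m + 1))
    altOuter n t (t.length : Int) 0 0

-- ===== PRECONDITION & SPEC =====
def Spec_solution (n : Int) (m : Int) (s : String) (out : Int) : Prop := out = solution_alt n m s
instance (n : Int) (m : Int) (s : String) (out : Int) : Decidable (Spec_solution n m s out) := by unfold Spec_solution; infer_instance

-- ===== CLAIM (what is proved, stated in full; the proofs are below) =====
def Claim_equal_solution : Prop := ∀ (n : Int) (m : Int) (s : String), Dom_solution n m s → Spec_solution n m s (solution n m s)

-- ===== LEMMAS AND PROOFS =====

-- "there is an IOI triple of t at j" (the match both loops react to)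
def MtP (t : List Char) (j : Int) : Prop :=
  PySem.List.pyGet? t j = some 'I' ∧ PySem.List.pyGet? t (j + 1) = some 'O' ∧
    PySem.List.pyGet? t (j + 2) = some 'I'

theorem mtP_lt (t : List Char) (j : Int) (h0 : 0 ≤ j) (h : MtP t j) :
    j + 2 < (t.length : Int) := by
  have h2 := h.2.2
  rw [PySem.List.pyGet?_of_nonneg (xs := t) (i := j + 2) (by omega)] at h2
  obtain ⟨hlt, -⟩ := List.getElem?_eq_some_iff.mp h2
  omega

theorem take3_iff (l : List Char) (a b c : Char) :
    l.take 3 = [a, b, c] ↔ l[0]? = some a ∧ l[1]? = some b ∧ l[2]? = some c := by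
  rcases l with _ | ⟨x, _ | ⟨y, _ | ⟨z, l⟩⟩⟩ <;> simp [List.take]

theorem slice_iff (m : Int) (cs : List Char) (idx : Int) (h0 : 0 ≤ idx) (hlt : idx < m - 1) :
    PySem.List.slice cs (some idx) (some (idx + 3)) = ['I', 'O', 'I'] ↔
      MtP (cs.take (m + 1).toNat) idx := by
  rw [PySem.List.slice_toNat cs h0 (by omega)]
  have h3 : (idx + 3).toNat - idx.toNat = 3 := by omega
  rw [h3, take3_iff]
  unfold MtP
  rw [PySem.List.pyGet?_of_nonneg (xs := cs.take (m + 1).toNat) (i := idx) (by omega),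
      PySem.List.pyGet?_of_nonneg (xs := cs.take (m + 1).toNat) (i := idx + 1) (by omega),
      PySem.List.pyGet?_of_nonneg (xs := cs.take (m + 1).toNat) (i := idx + 2) (by omega)]
  rw [List.getElem?_take_of_lt (by omega), List.getElem?_take_of_lt (by omega),
      List.getElem?_take_of_lt (by omega)]
  rw [List.getElem?_drop, List.getElem?_drop, List.getElem?_drop]
  have e1 : (idx + 1).toNat = idx.toNat + 1 := by omega
  have e2 : (idx + 2).toNat = idx.toNat + 2 := by omega
  rw [e1, e2]
  simp

theorem mtP_lt_m (m : Int) (cs : List Char) (j : Int) (h0 : 0 ≤ j)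
    (h : MtP (cs.take (m + 1).toNat) j) : j < m - 1 := by
  have := mtP_lt _ j h0 h
  have hle : (cs.take (m + 1).toNat).length ≤ (m + 1).toNat := List.length_take_le _ _
  omega

theorem inner_stop (t : List Char) (L j : Int)
    (h : ¬ (j + 2 < L ∧ PySem.List.pyGet? t (j + 1) = some 'O' ∧ PySem.List.pyGet? t (j + 2) = some 'I')) :
    altInner t L j = j := by
  rw [altInner, dif_neg h]

theorem inner_spec (t : List Char) : ∀ (μ : Nat) (j : Int),
    ((t.length : Int) - j).toNat ≤ μ → 0 ≤ j → PySem.List.pyGet? t j = some 'I' →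
    ∃ k : Nat, altInner t (t.length : Int) j = j + 2 * k ∧
      (∀ r : Nat, r < k → MtP t (j + 2 * r)) ∧ ¬ MtP t (j + 2 * k) := by
  intro μ
  induction μ with
  | zero =>
    intro j hμ h0 hI
    refine ⟨0, by rw [inner_stop _ _ _ (fun hc => by omega)]; push_cast; ring, by omega, ?_⟩
    intro hM
    have := mtP_lt t (j + 2 * ((0 : Nat) : Int)) (by push_cast; omega) hM
    push_cast at this; omega
  | succ μ ih =>
    intro j hμ h0 hI
    by_cases hc : j + 2 < (t.length : Int) ∧ PySem.List.pyGet? t (j + 1) = some 'O' ∧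
        PySem.List.pyGet? t (j + 2) = some 'I'
    · obtain ⟨k, hk1, hk2, hk3⟩ := ih (j + 2) (by omega) (by omega) hc.2.2
      refine ⟨k + 1, ?_, ?_, ?_⟩
      · rw [altInner, dif_pos hc, hk1]; push_cast; ring
      · intro r hr
        cases r with
        | zero =>
          have e : j + 2 * ((0 : Nat) : Int) = j := by push_cast; ring
          rw [e]; exact ⟨hI, hc.2.1, hc.2.2⟩
        | succ r' =>
          have := hk2 r' (by omega)
          have e : j + 2 + 2 * ((r' : Nat) : Int) = j + 2 * ((r' + 1 : Nat) : Int) := by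
            push_cast; ring
          rw [e] at this; exact this
      · have e : j + 2 + 2 * ((k : Nat) : Int) = j + 2 * ((k + 1 : Nat) : Int) := by
          push_cast; ring
        rw [e] at hk3; exact hk3
    · refine ⟨0, by rw [inner_stop _ _ _ hc]; push_cast; ring, by omega, ?_⟩
      intro hM
      have e : j + 2 * ((0 : Nat) : Int) = j := by push_cast; ring
      rw [e] at hM
      exact hc ⟨mtP_lt t j h0 hM, hM.2.1, hM.2.2⟩

theorem A_run (n m : Int) (cs : List Char) (hn : 1 ≤ n) : ∀ (k : Nat) (idx pc tot : Int),
    0 ≤ idx → 0 ≤ pc → pc ≤ n - 1 →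
    (∀ r : Nat, r < k → MtP (cs.take (m + 1).toNat) (idx + 2 * r)) →
    solLoop n m cs idx pc tot =
      solLoop n m cs (idx + 2 * k) (min (pc + k) (n - 1)) (tot + max 0 (pc + k - (n - 1))) := by
  intro k
  induction k with
  | zero =>
    intro idx pc tot h0 hpc0 hpc1 hrun
    rw [show idx + 2 * ((0 : Nat) : Int) = idx from by push_cast; ring,
        show min (pc + ((0 : Nat) : Int)) (n - 1) = pc from by push_cast; omega,
        show tot + max 0 (pc + ((0 : Nat) : Int) - (n - 1)) = tot from by push_cast; omega]
  | succ k ih =>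
    intro idx pc tot h0 hpc0 hpc1 hrun
    have hM : MtP (cs.take (m + 1).toNat) idx := by
      have := hrun 0 (by omega)
      rwa [show idx + 2 * ((0 : Nat) : Int) = idx from by push_cast; ring] at this
    have hlt : idx < m - 1 := mtP_lt_m m cs idx h0 hM
    rw [solLoop, dif_pos hlt, if_pos ((slice_iff m cs idx h0 hlt).mpr hM)]
    have hrun' : ∀ r : Nat, r < k → MtP (cs.take (m + 1).toNat) (idx + 2 + 2 * r) := by
      intro r hr
      have := hrun (r + 1) (by omega)
      rwa [show idx + 2 * ((r + 1 : Nat) : Int) = idx + 2 + 2 * ((r : Nat) : Int) from by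
        push_cast; ring] at this
    by_cases hn1 : pc + 1 = n
    · rw [if_pos hn1, ih (idx + 2) (n - 1) (tot + 1) (by omega) (by omega) (by omega) hrun']
      congr 1
      · push_cast; ring
      · push_cast; omega
      · push_cast; omega
    · rw [if_neg hn1, ih (idx + 2) (pc + 1) tot (by omega) (by omega) (by omega) hrun']
      congr 1
      · push_cast; ring
      · push_cast; omega
      · push_cast; omega

theorem A_nonpos (n m : Int) (cs : List Char) (hn : n ≤ 0) : ∀ (μ : Nat) (idx pc tot : Int),
    (m - 1 - idx).toNat ≤ μ → 0 ≤ pc → solLoop n m cs idx pc tot = tot := by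
  intro μ
  induction μ with
  | zero =>
    intro idx pc tot hμ hpc
    rw [solLoop, dif_neg (by omega)]
  | succ μ ih =>
    intro idx pc tot hμ hpc
    by_cases hlt : idx < m - 1
    · rw [solLoop, dif_pos hlt]
      split
      · rw [if_neg (by omega)]
        exact ih (idx + 2) (pc + 1) tot (by omega) (by omega)
      · exact ih (idx + 1) 0 tot (by omega) (by omega)
    · rw [solLoop, dif_neg hlt]

theorem B_dead (n : Int) (t : List Char) (hn : 1 ≤ n) : ∀ (μ : Nat) (i tot : Int),
    ((t.length : Int) - 1 - i).toNat ≤ μ → 0 ≤ i →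
    (∀ j : Int, i ≤ j → ¬ MtP t j) →
    altOuter n t (t.length : Int) i tot = tot := by
  intro μ
  induction μ with
  | zero =>
    intro i tot hμ h0 hdead
    rw [altOuter, dif_neg (by omega)]
  | succ μ ih =>
    intro i tot hμ h0 hdead
    by_cases hlt : i < (t.length : Int) - 1
    · rw [altOuter, dif_pos hlt]
      by_cases hI : PySem.List.pyGet? t i = some 'I'
      · rw [if_pos hI, inner_stop _ _ _ (fun hc => hdead i le_rfl ⟨hI, hc.2.1, hc.2.2⟩)]
        have hf : PySem.Int.floordiv (i - i) 2 = 0 := by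
          rw [show i - i = (0 : Int) from by ring,
              PySem.Int.floordiv_eq_ediv_of_pos (by norm_num)]
          simp
        rw [hf, show tot + max 0 (0 - n + 1) = tot from by omega]
        exact ih (i + 1) tot (by omega) (by omega) (fun j hj => hdead j (by omega))
      · rw [if_neg hI]
        exact ih (i + 1) tot (by omega) (by omega) (fun j hj => hdead j (by omega))
    · rw [altOuter, dif_neg hlt]

theorem B_step (n : Int) (t : List Char) (hn : 1 ≤ n) (i tot : Int) (h0 : 0 ≤ i)
    (hnm : ¬ MtP t i) :
    altOuter n t (t.length : Int) i tot = altOuter n t (t.length : Int) (i + 1) tot := by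
  by_cases hlt : i < (t.length : Int) - 1
  · rw [altOuter, dif_pos hlt]
    by_cases hI : PySem.List.pyGet? t i = some 'I'
    · rw [if_pos hI, inner_stop _ _ _ (fun hc => hnm ⟨hI, hc.2.1, hc.2.2⟩)]
      have hf : PySem.Int.floordiv (i - i) 2 = 0 := by
        rw [show i - i = (0 : Int) from by ring,
            PySem.Int.floordiv_eq_ediv_of_pos (by norm_num)]
        simp
      rw [hf, show tot + max 0 (0 - n + 1) = tot from by omega]
    · rw [if_neg hI]
  · rw [altOuter, dif_neg hlt, altOuter, dif_neg (by omega)]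

theorem main_eq (n m : Int) (cs : List Char) (hn : 1 ≤ n) (hm : 2 ≤ m) : ∀ (μ : Nat) (i tot : Int),
    (m - 1 - i).toNat ≤ μ → 0 ≤ i →
    solLoop n m cs i 0 tot =
      altOuter n (cs.take (m + 1).toNat) ((cs.take (m + 1).toNat).length : Int) i tot := by
  intro μ
  induction μ with
  | zero =>
    intro i tot hμ h0
    have hlt : ¬ i < m - 1 := by omega
    rw [solLoop, dif_neg hlt]
    exact (B_dead n _ hn _ i tot le_rfl h0
      (fun j hj hM => absurd (mtP_lt_m m cs j (by omega) hM) (by omega))).symm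
  | succ μ ih =>
    intro i tot hμ h0
    by_cases hlt : i < m - 1
    · by_cases hM : MtP (cs.take (m + 1).toNat) i
      · have hI := hM.1
        obtain ⟨k, hk1, hk2, hk3⟩ :=
          inner_spec (cs.take (m + 1).toNat) (((cs.take (m + 1).toNat).length : Int) - i).toNat
            i le_rfl h0 hI
        have hiL : i < ((cs.take (m + 1).toNat).length : Int) - 1 := by
          have := mtP_lt _ i h0 hM; omega
        rw [altOuter, dif_pos hiL, if_pos hI, hk1]
        have hf : PySem.Int.floordiv (i + 2 * (k : Int) - i) 2 = (k : Int) := by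
          rw [show i + 2 * (k : Int) - i = 2 * (k : Int) from by ring,
              PySem.Int.floordiv_eq_ediv_of_pos (by norm_num)]
          omega
        rw [hf, A_run n m cs hn k i 0 tot h0 le_rfl (by omega) hk2]
        by_cases h2 : i + 2 * (k : Int) < m - 1
        · rw [solLoop, dif_pos h2,
            if_neg (fun hs => hk3 ((slice_iff m cs _ (by omega) h2).mp hs))]
          rw [ih (i + 2 * (k : Int) + 1) (tot + max 0 (0 + (k : Int) - (n - 1))) (by omega)
            (by omega)]
          congr 1
          omega
        · rw [solLoop, dif_neg h2]
          rw [B_dead n _ hn (((cs.take (m + 1).toNat).length : Int) - 1 -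
              (i + 2 * (k : Int) + 1)).toNat (i + 2 * (k : Int) + 1) _ le_rfl (by omega)
            (fun j hj hMj => absurd (mtP_lt_m m cs j (by omega) hMj) (by omega))]
          omega
      · rw [solLoop, dif_pos hlt,
          if_neg (fun hs => hM ((slice_iff m cs i h0 hlt).mp hs))]
        rw [ih (i + 1) tot (by omega) (by omega)]
        exact (B_step n _ hn i tot h0 hM).symm
    · rw [solLoop, dif_neg hlt]
      exact (B_dead n _ hn _ i tot le_rfl h0
        (fun j hj hM => absurd (mtP_lt_m m cs j (by omega) hM) (by omega))).symm

-- ===== VERDICT (by name: the statement is the Claim_ definition above) =====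
theorem solution_spec : Claim_equal_solution := by
  intro n m s _
  show solution n m s = solution_alt n m s
  unfold solution solution_alt
  by_cases hg : n < 1 ∨ m < 2
  · rw [if_pos hg]
    rcases hg with hn | hm
    · exact A_nonpos n m s.toList (by omega) (m - 1 - 0).toNat 0 0 0 le_rfl le_rfl
    · rw [solLoop, dif_neg (by omega)]
  · rw [if_neg hg]
    push_neg at hg
    have hn : 1 ≤ n := hg.1
    have hm : 2 ≤ m := hg.2
    have ht : PySem.List.slice s.toList none (some (m + 1)) = s.toList.take (m + 1).toNat :=
      PySem.List.slice_to _ (by omega)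
    rw [ht]
    exact main_eq n m s.toList hn hm (m - 1 - 0).toNat 0 0 le_rfl le_rfl
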